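-- pv_equiv track=rewrite | github.com/csyager/advent_of_code_2023 | 14/main.py | roll_south
-- ===== SOURCE A (Python) =====
-- def roll_south(grid, rows, cols):
--
--     for col in range(cols):
--         landing_row = rows - 1
--         for row in range(rows-1, -1, -1):
--             if grid[row][col] == "#":
--                 landing_row = row - 1
--             elif grid[row][col] == "O":
--                 grid[row][col] = "."
--                 grid[landing_row][col] = "O"
--                 landing_row -= 1
--     return grid
-- ===== SOURCE B (Python) =====
-- def _settle(seg):
--     # rocks sink to the bottom of a wall-free segment; other cells keep their spot
--     k = seg.count("O")
--     return ["." if c == "O" else c for c in seg[:len(seg) - k]] + ["O"] * k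
--
--
-- def _roll_column(col):
--     out = []
--     seg = []
--     for cell in col:
--         if cell == "#":
--             out += _settle(seg) + ["#"]
--             seg = []
--         else:
--             seg.append(cell)
--     return out + _settle(seg)
--
--
-- def roll_south(grid, rows, cols):
--     for col in range(cols):
--         new = _roll_column([grid[r][col] for r in range(rows)])
--         for r in range(rows):
--             grid[r][col] = new[r]
--     return grid
-- ===== Notes on version B (the rewrite author's own statement) =====
-- stated objective: alternative
-- what changed: Per column, instead of A's bottom-up scan moving each rock individually with a landing-row pointer, B extracts the column, splits it top-down into '#'-separated segments, rewrites each segment in one shot (count the O's, keep non-rock cells in place with O's turned to '.', append that many O's at the segment bottom) and writes the column back.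
import Mathlib
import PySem

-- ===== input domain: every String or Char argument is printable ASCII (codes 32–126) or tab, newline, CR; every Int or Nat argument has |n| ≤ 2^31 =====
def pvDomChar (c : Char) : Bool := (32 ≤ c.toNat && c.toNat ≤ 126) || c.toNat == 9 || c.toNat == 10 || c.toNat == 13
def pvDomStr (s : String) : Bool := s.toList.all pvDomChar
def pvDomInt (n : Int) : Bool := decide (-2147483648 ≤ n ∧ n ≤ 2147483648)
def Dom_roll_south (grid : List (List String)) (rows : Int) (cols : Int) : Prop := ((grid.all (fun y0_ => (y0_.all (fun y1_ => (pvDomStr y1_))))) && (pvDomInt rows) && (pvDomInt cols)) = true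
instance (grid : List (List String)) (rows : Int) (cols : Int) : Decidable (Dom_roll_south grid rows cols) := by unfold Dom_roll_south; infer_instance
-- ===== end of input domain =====

-- B rewrites each column segment-wise (split on '#', settle each segment in one shot) instead of
-- A's bottom-up landing-pointer scan; equivalence is about the returned grid (the Python versions
-- both also mutate the argument in place, identically).

-- ===== PORT A =====
-- inner loop body of A, factored as a named step (literal transliteration of the loop body)
def rsStepA (col : Int) (st : List (List String) × Int) (row : Int) : List (List String) × Int :=
  let cell := PySem.List.pyGetD (PySem.List.pyGetD st.1 row []) col ""
  if cell = "#" then (st.1, row - 1)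
  else if cell = "O" then
    let g1 := PySem.List.pySetD st.1 row (PySem.List.pySetD (PySem.List.pyGetD st.1 row []) col ".")
    let g2 := PySem.List.pySetD g1 st.2 (PySem.List.pySetD (PySem.List.pyGetD g1 st.2 []) col "O")
    (g2, st.2 - 1)
  else st

def roll_south (grid : List (List String)) (rows : Int) (cols : Int) : List (List String) :=
  (PySem.List.pyRange 0 cols 1).foldl
    (fun g col => ((PySem.List.pyRange (rows - 1) (-1) (-1)).foldl (rsStepA col) (g, rows - 1)).1)
    grid

-- ===== PORT B =====
-- _settle(seg): rocks sink to the bottom of a wall-free segment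
def pySettle (seg : List String) : List String :=
  let k := PySem.List.count seg "O"
  (PySem.List.slice seg none (some ((seg.length : Int) - (k : Int)))).map
      (fun c => if c = "O" then "." else c)
    ++ PySem.List.pyRepeat ["O"] (k : Int)

-- _roll_column(col): accumulate '#'-separated segments top-down, settling each
def pyRollColumn (col : List String) : List String :=
  let p := col.foldl
    (fun (st : List String × List String) cell =>
      if cell = "#" then (st.1 ++ pySettle st.2 ++ ["#"], [])
      else (st.1, st.2 ++ [cell]))
    ([], [])
  p.1 ++ pySettle p.2

-- write-back loop body of B
def rsStepB (col : Int) (nw : List String) (g2 : List (List String)) (r : Int) : List (List String) :=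
  PySem.List.pySetD g2 r
    (PySem.List.pySetD (PySem.List.pyGetD g2 r []) col (PySem.List.pyGetD nw r ""))

def roll_south_alt (grid : List (List String)) (rows : Int) (cols : Int) : List (List String) :=
  (PySem.List.pyRange 0 cols 1).foldl
    (fun g col =>
      let nw := pyRollColumn
        ((PySem.List.pyRange 0 rows 1).map
          (fun r => PySem.List.pyGetD (PySem.List.pyGetD g r []) col ""))
      (PySem.List.pyRange 0 rows 1).foldl (rsStepB col nw) g)
    grid

-- ===== PRECONDITION & SPEC =====
-- exactly the inputs where Python A returns (otherwise grid[row][col] raises IndexError):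
-- either a loop range is empty, or the first `rows` rows exist and each has at least `cols` cells
def Pre_roll_south (grid : List (List String)) (rows : Int) (cols : Int) : Prop :=
  rows ≤ 0 ∨ cols ≤ 0 ∨
    (rows ≤ (grid.length : Int) ∧ ∀ row ∈ grid.take rows.toNat, cols ≤ (row.length : Int))
instance (grid : List (List String)) (rows : Int) (cols : Int) : Decidable (Pre_roll_south grid rows cols) := by
  unfold Pre_roll_south; infer_instance

def pvWitness_roll_south : List (List String) × Int × Int :=
  ([["O", "."], [".", "#"], ["O", "O"]], 3, 2)

def Spec_roll_south (grid : List (List String)) (rows : Int) (cols : Int) (out : List (List String)) : Prop := out = roll_south_alt grid rows cols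
instance (grid : List (List String)) (rows : Int) (cols : Int) (out : List (List String)) : Decidable (Spec_roll_south grid rows cols out) := by unfold Spec_roll_south; infer_instance

-- ===== CLAIM (what is proved, stated in full; the proofs are below) =====
def Claim_equal_roll_south : Prop := ∀ (grid : List (List String)) (rows : Int) (cols : Int), Dom_roll_south grid rows cols → Pre_roll_south grid rows cols → Spec_roll_south grid rows cols (roll_south grid rows cols)

-- ===== LEMMAS AND PROOFS =====

-- ---- proof-side definitions ----

def pvDot (c : String) : String := if c = "O" then "." else c

-- write the values vs down column c of g (row i gets vs[i]); extra values are ignored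
def pvWcol : List (List String) → Nat → List String → List (List String)
  | [], _, _ => []
  | g, _, [] => g
  | row :: g, c, v :: vs => row.set c v :: pvWcol g c vs

-- column c of g, rows 0..n-1
def pvColOf (g : List (List String)) (c : Nat) (n : Nat) : List String :=
  (List.range n).map (fun r => (g.getD r []).getD c "")

-- A's inner loop on a single column: process indices m-1, …, 0 with landing pointer l
def pvRunA : List String → Int → Nat → List String × Int
  | ys, l, 0 => (ys, l)
  | ys, l, m + 1 =>
    let cell := ys.getD m ""
    if cell = "#" then pvRunA ys ((m : Int) - 1) m
    else if cell = "O" then pvRunA ((ys.set m ".").set l.toNat "O") (l - 1) m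
    else pvRunA ys l m

-- set positions l, l-1, …, l-k+1 to "O"
def pvFill : List String → Int → Nat → List String
  | zs, _, 0 => zs
  | zs, l, k + 1 => pvFill (zs.set l.toNat "O") (l - 1) k

-- recursive form of B's per-column fold
def pvSegRoll : List String → List String → List String
  | seg, [] => pySettle seg
  | seg, c :: t => if c = "#" then pySettle seg ++ "#" :: pvSegRoll [] t else pvSegRoll (seg ++ [c]) t

-- ---- small list helpers ----

theorem pvGetD_at_len (xs : List String) (y : String) (zs : List String) (d : String) :
    (xs ++ y :: zs).getD xs.length d = y := by
  simp [List.getD_eq_getElem?_getD, List.getElem?_append_right]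

theorem pvSet_append_right (xs ys : List String) (n : Nat) (v : String) :
    (xs ++ ys).set (xs.length + n) v = xs ++ ys.set n v := by
  simp

theorem pvGetD_set_self (row : List String) (c : Nat) (v : String) (d : String)
    (h : c < row.length) : (row.set c v).getD c d = v := by
  simp [List.getD_eq_getElem?_getD, h]

-- ---- pySettle ----

theorem pySettle_eq (seg : List String) :
    pySettle seg =
      (seg.map pvDot).take (seg.length - seg.count "O")
        ++ List.replicate (seg.count "O") "O" := by
  have h : List.count "O" seg ≤ seg.length := List.count_le_length
  have h2 : ((seg.length : Int) - (List.count "O" seg : Int)) = ((seg.length - List.count "O" seg : Nat) : Int) := by omega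
  simp [pySettle, PySem.List.count_eq, h2, PySem.List.slice_to_natCast,
    PySem.List.pyRepeat_singleton]
  rfl

theorem length_pySettle (seg : List String) : (pySettle seg).length = seg.length := by
  have h : List.count "O" seg ≤ seg.length := List.count_le_length
  simp [pySettle_eq]
  omega

-- ---- pvSegRoll ----

theorem pvRollAux (col : List String) : ∀ (out seg : List String),
    (col.foldl (fun (st : List String × List String) cell =>
        if cell = "#" then (st.1 ++ pySettle st.2 ++ ["#"], [])
        else (st.1, st.2 ++ [cell])) (out, seg)).1
      ++ pySettle (col.foldl (fun (st : List String × List String) cell =>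
        if cell = "#" then (st.1 ++ pySettle st.2 ++ ["#"], [])
        else (st.1, st.2 ++ [cell])) (out, seg)).2
    = out ++ pvSegRoll seg col := by
  induction col with
  | nil => intro out seg; simp [pvSegRoll]
  | cons c t ih =>
    intro out seg
    by_cases hc : c = "#"
    · subst hc
      simp only [List.foldl_cons, if_pos rfl, pvSegRoll, ih]
      simp [pvSegRoll]
    · simp only [List.foldl_cons, if_neg hc, pvSegRoll, ih]

theorem pyRollColumn_eq_segRoll (col : List String) : pyRollColumn col = pvSegRoll [] col := by
  simpa [pyRollColumn] using pvRollAux col [] []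

theorem pvSegRoll_no_wall (t : List String) (seg : List String) (h : "#" ∉ t) :
    pvSegRoll seg t = pySettle (seg ++ t) := by
  induction t generalizing seg with
  | nil => simp [pvSegRoll]
  | cons c t ih =>
    have hc : c ≠ "#" := fun hh => h (hh ▸ List.mem_cons_self)
    have ht : "#" ∉ t := fun hh => h (List.mem_cons_of_mem _ hh)
    simp only [pvSegRoll, if_neg hc, ih (seg ++ [c]) ht]
    simp

theorem pvSegRoll_last_wall (a b : List String) (seg : List String) (h : "#" ∉ b) :
    pvSegRoll seg (a ++ "#" :: b) = pvSegRoll seg a ++ "#" :: pySettle b := by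
  induction a generalizing seg with
  | nil =>
    simp only [List.nil_append, pvSegRoll, if_pos rfl]
    rw [pvSegRoll_no_wall b [] h]
    simp [pvSegRoll]
  | cons x a ih =>
    by_cases hx : x = "#"
    · subst hx
      simp only [List.cons_append, pvSegRoll, if_pos rfl, ih]
      simp
    · simp only [List.cons_append, pvSegRoll, if_neg hx, ih]


theorem length_pvSegRoll (col : List String) (seg : List String) :
    (pvSegRoll seg col).length = seg.length + col.length := by
  induction col generalizing seg with
  | nil => simp [pvSegRoll, length_pySettle]
  | cons c t ih =>
    by_cases hc : c = "#"
    · subst hc; simp [pvSegRoll, length_pySettle, ih]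
    · simp only [pvSegRoll, if_neg hc, ih]; simp; omega

theorem pvExists_last_wall (u : List String) (h : "#" ∈ u) :
    ∃ a b, u = a ++ "#" :: b ∧ "#" ∉ b := by
  induction u using List.reverseRecOn with
  | nil => simp at h
  | append_singleton u' c ih =>
    by_cases hc : c = "#"
    · exact ⟨u', [], by simp [hc], by simp⟩
    · have hu : "#" ∈ u' := by
        rcases List.mem_append.1 h with h1 | h1
        · exact h1
        · simp at h1; exact absurd h1.symm hc
      obtain ⟨a, b, rfl, hb⟩ := ih hu
      exact ⟨a, b ++ [c], by simp, by
        intro hm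
        rcases List.mem_append.1 hm with h1 | h1
        · exact hb h1
        · simp at h1; exact hc h1.symm⟩

-- ---- pvFill ----

theorem pvFill_eq (k : Nat) (zs : List String) (l : Int)
    (hk : (k : Int) ≤ l + 1) (hl : l < (zs.length : Int)) :
    pvFill zs l k =
      zs.take ((l + 1).toNat - k) ++ List.replicate k "O" ++ zs.drop (l + 1).toNat := by
  induction k generalizing zs l with
  | zero => simp [pvFill]
  | succ k ih =>
    have hlt : l.toNat < zs.length := by omega
    rw [pvFill, ih _ _ (by omega) (by simp only [List.length_set]; omega)]
    have h1 : (l - 1 + 1).toNat = l.toNat := by omega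
    have h2 : (l + 1).toNat - (k + 1) = l.toNat - k := by omega
    have h3 : (l + 1).toNat = l.toNat + 1 := by omega
    rw [h1, h2, h3, List.take_set, List.drop_set]
    rw [List.set_eq_of_length_le (by simp only [List.length_take]; omega)]
    rw [if_neg (by omega), Nat.sub_self, List.drop_eq_getElem_cons hlt, List.set_cons_zero,
      List.replicate_succ']
    simp

-- ---- the single-column run of A ----

theorem pvRunA_seg (w : List String) :
    ∀ (b : List String), "#" ∉ b → ∀ (v : List String) (l : Int),
      ((w.length : Int) + b.length - 1 ≤ l) → (l < (w.length : Int) + b.length + v.length) →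
      pvRunA (w ++ (b ++ v)) l (w.length + b.length) =
        pvRunA (pvFill (w ++ (b.map pvDot ++ v)) l (b.count "O")) (l - b.count "O")
          w.length := by
  intro b
  induction b using List.reverseRecOn generalizing w with
  | nil => intro _ v l _ _; simp [pvFill]
  | append_singleton b c ihb =>
    intro hb v l h1 h2
    have hbb : "#" ∉ b := fun hh => hb (List.mem_append.2 (Or.inl hh))
    have hcw : c ≠ "#" := fun hh => hb (by simp [hh])
    have hm : w.length + (b ++ [c]).length = (w.length + b.length) + 1 := by simp; omega
    have hM : ((w.length + b.length : Nat) : Int) ≤ l := by simp at h1 ⊢; omega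
    have hys : w ++ ((b ++ [c]) ++ v) = (w ++ b) ++ (c :: v) := by simp
    have hlenwb : (w ++ b).length = w.length + b.length := by simp
    rw [hm, hys, pvRunA]
    have hcell : ((w ++ b) ++ (c :: v)).getD (w.length + b.length) "" = c := by
      rw [← hlenwb]; exact pvGetD_at_len _ _ _ _
    simp only [hcell]
    rw [if_neg hcw]
    by_cases hc : c = "O"
    · subst hc
      rw [if_pos rfl]
      have hset1 : ((w ++ b) ++ ("O" :: v)).set (w.length + b.length) "." =
          (w ++ b) ++ ("." :: v) := by
        rw [← hlenwb]
        have := pvSet_append_right (w ++ b) ("O" :: v) 0 "."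
        simpa using this
      obtain ⟨d, hd⟩ : ∃ d, l.toNat = (w.length + b.length) + d :=
        ⟨l.toNat - (w.length + b.length), by omega⟩
      have hset2 : ((w ++ b) ++ ("." :: v)).set l.toNat "O" =
          (w ++ b) ++ (("." :: v).set d "O") := by
        rw [hd, ← hlenwb, pvSet_append_right]
      rw [hset1, hset2]
      set v' := ("." :: v).set d "O" with hv'
      have hlv' : v'.length = v.length + 1 := by simp [hv']
      have happ : (w ++ b) ++ v' = w ++ (b ++ v') := by simp
      rw [happ]
      rw [ihb w hbb v' (l - 1) (by simp at h1 ⊢; omega) (by simp [hlv'] at h2 ⊢; omega)]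
      -- reconcile with the RHS fill
      have hmapc : (b ++ ["O"]).map pvDot = b.map pvDot ++ ["."] := by simp [pvDot]
      have hcnt : (b ++ ["O"]).count "O" = b.count "O" + 1 := by simp
      rw [hmapc, hcnt]
      have hz : w ++ ((b.map pvDot ++ ["."]) ++ v) = (w ++ b.map pvDot) ++ ("." :: v) := by
        simp
      rw [hz, pvFill]
      have hlenwd : (w ++ b.map pvDot).length = w.length + b.length := by simp
      have hset3 : ((w ++ b.map pvDot) ++ ("." :: v)).set l.toNat "O" =
          (w ++ b.map pvDot) ++ v' := by
        rw [hv', hd, ← hlenwd, pvSet_append_right]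
      rw [hset3]
      have hz2 : (w ++ b.map pvDot) ++ v' = w ++ (b.map pvDot ++ v') := by simp
      rw [hz2]
      congr 1
      omega
    · rw [if_neg hc]
      have happ : (w ++ b) ++ (c :: v) = w ++ (b ++ (c :: v)) := by simp
      rw [happ]
      rw [ihb w hbb (c :: v) l (by simp at h1 ⊢; omega) (by simp at h2 ⊢; omega)]
      have hmapc : (b ++ [c]).map pvDot = b.map pvDot ++ [c] := by
        simp [pvDot, hc]
      have hcnt : (b ++ [c]).count "O" = b.count "O" := by
        simp [List.count_append, List.count_singleton, hc]
      rw [hmapc, hcnt]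
      have hz : w ++ ((b.map pvDot ++ [c]) ++ v) = w ++ (b.map pvDot ++ (c :: v)) := by simp
      rw [hz]

theorem pvRunA_gen (n : Nat) :
    ∀ (u v : List String), u.length = n →
      (pvRunA (u ++ v) ((u.length : Int) - 1) u.length).1 = pvSegRoll [] u ++ v := by
  induction n using Nat.strong_induction_on with
  | _ n ih =>
    intro u v hu
    by_cases hw : "#" ∈ u
    · obtain ⟨a, b, rfl, hb⟩ := pvExists_last_wall u hw
      set k := b.count "O" with hk
      have hkb : k ≤ b.length := List.count_le_length
      set w : List String := a ++ ["#"] with hwdef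
      have hwl : w.length = a.length + 1 := by simp [hwdef]
      have hul : (a ++ "#" :: b).length = w.length + b.length := by simp [hwdef]; omega
      have happ : (a ++ "#" :: b) ++ v = w ++ (b ++ v) := by simp [hwdef]
      rw [hul, happ]
      rw [pvRunA_seg w b hb v _ (by push_cast; omega) (by push_cast; omega)]
      -- characterize the filled list
      have hZ : w ++ (b.map pvDot ++ v) = (w ++ b.map pvDot) ++ v := by simp
      have hlenwd : (w ++ b.map pvDot).length = w.length + b.length := by
        simp [hwdef]; omega
      have hfill := pvFill_eq k (w ++ (b.map pvDot ++ v))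
        (((w.length + b.length : Nat) : Int) - 1)
        (by simp; try omega) (by simp [hwdef]; try omega)
      have htn : ((((w.length + b.length : Nat) : Int) - 1) + 1).toNat = w.length + b.length := by
        omega
      rw [htn] at hfill
      have htake : (w ++ (b.map pvDot ++ v)).take (w.length + b.length - k) =
          w ++ (b.map pvDot).take (b.length - k) := by
        have hidx : w.length + b.length - k = w.length + (b.length - k) := by omega
        rw [hidx, List.take_append]
        rw [List.take_of_length_le (by omega), Nat.add_sub_cancel_left, List.take_append]
        simp [Nat.sub_eq_zero_of_le, hkb]
      have hdrop : (w ++ (b.map pvDot ++ v)).drop (w.length + b.length) = v := by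
        rw [hZ, ← hlenwd, List.drop_left]
      rw [htake, hdrop] at hfill
      set T : List String := (b.map pvDot).take (b.length - k) ++ (List.replicate k "O" ++ v)
        with hT
      have hXT : w ++ (b.map pvDot).take (b.length - k) ++ List.replicate k "O" ++ v =
          a ++ ("#" :: T) := by simp [hwdef, hT]
      rw [hfill, hXT]
      -- one '#' step
      have hstep : pvRunA (a ++ ("#" :: T)) ((((w.length + b.length : Nat) : Int) - 1) - k)
            w.length =
          pvRunA (a ++ ("#" :: T)) ((a.length : Int) - 1) a.length := by
        rw [hwl, pvRunA]
        simp only [pvGetD_at_len]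
        simp
      rw [hstep]
      rw [ih a.length (by simp at hu; omega) a ("#" :: T) rfl]
      rw [pvSegRoll_last_wall a b [] hb]
      simp only [hT, pySettle_eq, ← hk]
      simp [List.map_take]
    · -- no wall in u
      have h0 := pvRunA_seg [] u hw v ((u.length : Int) - 1) (by simp)
        (by simp; try omega)
      simp only [List.length_nil, List.nil_append, Nat.zero_add] at h0
      rw [h0]
      rw [pvRunA]
      have hfill := pvFill_eq (u.count "O") (u.map pvDot ++ v) ((u.length : Int) - 1)
        (by have := List.count_le_length (a := "O") (l := u); omega)
        (by simp; try omega)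
      have htn : (((u.length : Int) - 1) + 1).toNat = u.length := by omega
      rw [htn] at hfill
      have htake : (u.map pvDot ++ v).take (u.length - u.count "O") =
          (u.map pvDot).take (u.length - u.count "O") :=
        List.take_append_of_le_length (by simp; try omega)
      have hdrop : (u.map pvDot ++ v).drop u.length = v := by
        have : u.length = (u.map pvDot).length := by simp
        rw [this, List.drop_left]
      rw [htake, hdrop] at hfill
      rw [hfill]
      rw [pvSegRoll_no_wall u [] hw]
      simp [pySettle_eq]

-- ---- pvWcol ----

theorem pvColOf_cons (row : List String) (g : List (List String)) (c : Nat) (n : Nat) :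
    pvColOf (row :: g) c (n + 1) = row.getD c "" :: pvColOf g c n := by
  simp only [pvColOf]
  rw [List.range_succ_eq_map, List.map_cons, List.map_map]
  congr 1

theorem length_pvWcol (g : List (List String)) (c : Nat) (vs : List String) :
    (pvWcol g c vs).length = g.length := by
  induction g generalizing vs with
  | nil => simp [pvWcol]
  | cons row g ih =>
    cases vs with
    | nil => simp [pvWcol]
    | cons v vs => simp [pvWcol, ih]

theorem pvWcol_nil (g : List (List String)) (c : Nat) : pvWcol g c [] = g := by
  cases g <;> simp [pvWcol]

theorem getD_pvWcol (g : List (List String)) (c : Nat) (vs : List String) (i : Nat)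
    (hi : i < vs.length) (hg : i < g.length) :
    (pvWcol g c vs).getD i [] = (g.getD i []).set c (vs.getD i "") := by
  induction g generalizing vs i with
  | nil => simp at hg
  | cons row g ih =>
    cases vs with
    | nil => simp at hi
    | cons v vs =>
      cases i with
      | zero => simp [pvWcol]
      | succ i =>
        simp only [pvWcol, List.getD_cons_succ]
        exact ih vs i (by simpa using hi) (by simpa using hg)

theorem len_getD_pvWcol (g : List (List String)) (c : Nat) (vs : List String) (i : Nat) :
    ((pvWcol g c vs).getD i []).length = (g.getD i []).length := by
  induction g generalizing vs i with
  | nil => simp [pvWcol]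
  | cons row g ih =>
    cases vs with
    | nil => simp [pvWcol]
    | cons v vs =>
      cases i with
      | zero => simp [pvWcol]
      | succ i => simp only [pvWcol, List.getD_cons_succ]; exact ih vs i

theorem pvWcol_set (g : List (List String)) (c : Nat) (vs : List String) (r : Nat) (v : String)
    (hr : r < vs.length) :
    (pvWcol g c vs).set r (((pvWcol g c vs).getD r []).set c v) = pvWcol g c (vs.set r v) := by
  induction g generalizing vs r with
  | nil => simp [pvWcol]
  | cons row g ih =>
    cases vs with
    | nil => simp at hr
    | cons v0 vs =>
      cases r with
      | zero => simp [pvWcol, List.set_set]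
      | succ r =>
        simp only [pvWcol, List.getD_cons_succ, List.set_cons_succ, List.set_cons_zero]
        rw [ih vs r (by simpa using hr)]

theorem pvWcol_snoc (g : List (List String)) (c : Nat) (vs : List String) (v : String) :
    pvWcol g c (vs ++ [v]) =
      (pvWcol g c vs).set vs.length (((pvWcol g c vs).getD vs.length []).set c v) := by
  induction g generalizing vs with
  | nil => simp [pvWcol]
  | cons row g ih =>
    cases vs with
    | nil => simp [pvWcol, pvWcol_nil]
    | cons v0 vs =>
      simp only [List.cons_append, pvWcol, List.length_cons, List.getD_cons_succ,
        List.set_cons_succ]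
      rw [ih vs]

theorem pvWcol_colOf (g : List (List String)) (c : Nat) (n : Nat)
    (hn : n ≤ g.length) (hc : ∀ i, i < n → c < (g.getD i []).length) :
    pvWcol g c (pvColOf g c n) = g := by
  induction g generalizing n with
  | nil => simp [pvColOf, pvWcol]
  | cons row g ih =>
    cases n with
    | zero => simp [pvColOf, pvWcol_nil]
    | succ n =>
      rw [pvColOf_cons]
      simp only [pvWcol]
      have hc0 : c < row.length := by simpa using hc 0 (Nat.succ_pos n)
      rw [List.getD_eq_getElem _ _ hc0, List.set_getElem_self]
      rw [ih n (by simp at hn; omega) (fun i hi => by simpa using hc (i + 1) (by omega))]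

theorem length_pvColOf (g : List (List String)) (c : Nat) (n : Nat) :
    (pvColOf g c n).length = n := by
  simp [pvColOf]

-- ---- write-back loop of B is pvWcol ----

theorem pvWB (vs : List String) (g : List (List String)) (c : Nat) :
    (List.range vs.length).foldl
        (fun g2 r => g2.set r ((g2.getD r []).set c (vs.getD r ""))) g
      = pvWcol g c vs := by
  induction vs using List.reverseRecOn with
  | nil => simp [pvWcol_nil]
  | append_singleton vs v ih =>
    have hlen : (vs ++ [v]).length = vs.length + 1 := by simp
    rw [hlen, List.range_succ, List.foldl_append]
    have hcongr := PySem.List.foldl_congr_mem (List.range vs.length)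
      (fun g2 r => g2.set r ((g2.getD r []).set c ((vs ++ [v]).getD r "")))
      (fun g2 r => g2.set r ((g2.getD r []).set c (vs.getD r ""))) g
      (fun acc r hr => by
        have hrl : r < vs.length := List.mem_range.1 hr
        show acc.set r ((acc.getD r []).set c ((vs ++ [v]).getD r "")) =
          acc.set r ((acc.getD r []).set c (vs.getD r ""))
        rw [List.getD_append _ _ _ _ hrl])
    rw [hcongr, ih]
    simp only [List.foldl_cons, List.foldl_nil]
    have : (vs ++ [v]).getD vs.length "" = v := pvGetD_at_len vs v [] ""
    rw [this, ← pvWcol_snoc]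

-- ---- the countdown index list ----

theorem pvCountdown_succ (m : Nat) :
    (List.range (m + 1)).map (fun (k : Nat) => ((m + 1 : Nat) : Int) - 1 - (k : Int)) =
      (m : Int) :: (List.range m).map (fun (k : Nat) => (m : Int) - 1 - (k : Int)) := by
  rw [List.range_succ_eq_map, List.map_cons, List.map_map]
  congr 1
  · push_cast; ring
  · exact List.map_congr_left (fun k _ => by simp [Function.comp]; push_cast; ring)

-- ---- simulation: A's grid loop through pvWcol ----

theorem pvSIM (c : Nat) (g : List (List String)) :
    ∀ (m : Nat) (ys : List String) (l : Int),
      m ≤ ys.length → ys.length ≤ g.length →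
      (∀ i, i < ys.length → c < (g.getD i []).length) →
      ((m : Int) - 1 ≤ l) → (l < (ys.length : Int)) →
      ((List.range m).map (fun (k : Nat) => (m : Int) - 1 - (k : Int))).foldl (rsStepA (c : Int))
          (pvWcol g c ys, l)
        = (pvWcol g c (pvRunA ys l m).1, (pvRunA ys l m).2) := by
  intro m
  induction m with
  | zero => intro ys l _ _ _ _ _; simp [pvRunA]
  | succ m ih =>
    intro ys l hm hyg hcb hl1 hl2
    rw [pvCountdown_succ, List.foldl_cons]
    have hmy : m < ys.length := by omega
    have hmg : m < g.length := by omega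
    have hml : (m : Int) ≤ l := by push_cast at hl1; omega
    have hcell : PySem.List.pyGetD (PySem.List.pyGetD (pvWcol g c ys) (m : Int) [])
        (c : Int) "" = ys.getD m "" := by
      simp only [PySem.List.pyGetD_natCast]
      rw [getD_pvWcol g c ys m hmy hmg]
      exact pvGetD_set_self _ _ _ _ (hcb m hmy)
    by_cases hsh : ys.getD m "" = "#"
    · have hstep : rsStepA (c : Int) (pvWcol g c ys, l) (m : Int) =
          (pvWcol g c ys, (m : Int) - 1) := by
        simp only [rsStepA, hcell]
        rw [if_pos hsh]
      have hrun : pvRunA ys l (m + 1) = pvRunA ys ((m : Int) - 1) m := by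
        simp only [pvRunA, hsh]
        simp
      rw [hstep, hrun]
      exact ih ys ((m : Int) - 1) (by omega) hyg hcb (by push_cast; omega) (by omega)
    · by_cases hso : ys.getD m "" = "O"
      · have hl0 : (0 : Int) ≤ l := by omega
        have hlg : l.toNat < (pvWcol g c (ys.set m ".")).length := by
          rw [length_pvWcol]; omega
        have hg1 : PySem.List.pySetD (pvWcol g c ys) (m : Int)
              (PySem.List.pySetD (PySem.List.pyGetD (pvWcol g c ys) (m : Int) []) (c : Int) ".")
            = pvWcol g c (ys.set m ".") := by
          simp only [PySem.List.pySetD_natCast, PySem.List.pyGetD_natCast]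
          exact pvWcol_set g c ys m "." hmy
        have hgd : PySem.List.pyGetD (pvWcol g c (ys.set m ".")) l []
            = (pvWcol g c (ys.set m ".")).getD l.toNat [] := by
          rw [PySem.List.pyGetD_eq_getElem _ _ hl0 (by push_cast at hlg ⊢; omega),
            List.getD_eq_getElem _ _ hlg]
        have hg2 : PySem.List.pySetD (pvWcol g c (ys.set m "."))  l
              (PySem.List.pySetD (PySem.List.pyGetD (pvWcol g c (ys.set m ".")) l [])
                (c : Int) "O")
            = pvWcol g c ((ys.set m ".").set l.toNat "O") := by
          rw [PySem.List.pySetD_of_nonneg _ _ hl0, hgd]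
          simp only [PySem.List.pySetD_natCast]
          exact pvWcol_set g c (ys.set m ".") l.toNat "O" (by simpa using (by omega : l.toNat < ys.length))
        have hstep : rsStepA (c : Int) (pvWcol g c ys, l) (m : Int) =
            (pvWcol g c ((ys.set m ".").set l.toNat "O"), l - 1) := by
          simp only [rsStepA, hcell]
          rw [if_neg hsh, if_pos hso, hg1, hg2]
        have hrun : pvRunA ys l (m + 1) = pvRunA ((ys.set m ".").set l.toNat "O") (l - 1) m := by
          simp only [pvRunA, hsh, hso]
          simp
        rw [hstep, hrun]
        exact ih ((ys.set m ".").set l.toNat "O") (l - 1) (by simpa using (by omega : m ≤ ys.length))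
          (by simpa using hyg) (by simpa using hcb) (by push_cast; omega) (by simpa using (by omega : l - 1 < (ys.length : Int)))
      · have hstep : rsStepA (c : Int) (pvWcol g c ys, l) (m : Int) = (pvWcol g c ys, l) := by
          simp only [rsStepA, hcell]
          rw [if_neg hsh, if_neg hso]
        have hrun : pvRunA ys l (m + 1) = pvRunA ys l m := by
          simp only [pvRunA, hsh, hso]
          rw [if_neg (by simp [hsh]), if_neg (by simp [hso])]
        rw [hstep, hrun]
        exact ih ys l (by omega) hyg hcb (by push_cast; omega) (by omega)

-- ---- per-column equality and the outer loop ----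

theorem pvKey (R C c : Nat) (g : List (List String)) (hc : c < C)
    (hR : R ≤ g.length) (hC : ∀ i, i < R → C ≤ (g.getD i []).length) :
    ((PySem.List.pyRange ((R : Int) - 1) (-1) (-1)).foldl (rsStepA (c : Int)) (g, (R : Int) - 1)).1
      = pvWcol g c (pvSegRoll [] (pvColOf g c R)) := by
  have hyR : (pvColOf g c R).length = R := length_pvColOf g c R
  have hC' : ∀ i, i < R → c < (g.getD i []).length := fun i hi => lt_of_lt_of_le hc (hC i hi)
  have h1 : PySem.List.pyRange ((R : Int) - 1) (-1) (-1) =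
      (List.range R).map (fun (k : Nat) => (R : Int) - 1 - (k : Int)) := by
    rw [PySem.List.pyRange_neg_one]
    have h2 : ((R : Int) - 1 - (-1)).toNat = R := by omega
    rw [h2]
  have hsim := pvSIM c g R (pvColOf g c R) ((R : Int) - 1)
    (by rw [hyR]) (by rw [hyR]; exact hR) (fun i hi => hC' i (hyR ▸ hi))
    (le_refl _) (by rw [hyR]; omega)
  rw [pvWcol_colOf g c R hR hC'] at hsim
  rw [h1, hsim]
  have hgen := pvRunA_gen R (pvColOf g c R) [] hyR
  rw [List.append_nil, hyR] at hgen
  rw [hgen]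
  simp

theorem pvKeyB (R C c : Nat) (g : List (List String)) (hc : c < C)
    (hR : R ≤ g.length) (hC : ∀ i, i < R → C ≤ (g.getD i []).length) :
    (let nw := pyRollColumn
        ((PySem.List.pyRange 0 (R : Int) 1).map
          (fun r => PySem.List.pyGetD (PySem.List.pyGetD g r []) (c : Int) ""))
     (PySem.List.pyRange 0 (R : Int) 1).foldl (rsStepB (c : Int) nw) g)
      = pvWcol g c (pvSegRoll [] (pvColOf g c R)) := by
  have hrange : PySem.List.pyRange 0 (R : Int) 1 =
      (List.range R).map (fun (k : Nat) => (k : Int)) := by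
    rw [PySem.List.pyRange_one]
    simp
  have hcol : ((List.range R).map (fun (k : Nat) => (k : Int))).map
        (fun r => PySem.List.pyGetD (PySem.List.pyGetD g r []) (c : Int) "")
      = pvColOf g c R := by
    rw [List.map_map]
    exact List.map_congr_left (fun r _ => by
      simp [Function.comp, PySem.List.pyGetD_natCast])
  have hnw : pyRollColumn (pvColOf g c R) = pvSegRoll [] (pvColOf g c R) :=
    pyRollColumn_eq_segRoll _
  have hlen : (pvSegRoll [] (pvColOf g c R)).length = R := by
    rw [length_pvSegRoll, length_pvColOf]; simp
  show (PySem.List.pyRange 0 (R : Int) 1).foldl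
      (rsStepB (c : Int) (pyRollColumn ((PySem.List.pyRange 0 (R : Int) 1).map
        (fun r => PySem.List.pyGetD (PySem.List.pyGetD g r []) (c : Int) "")))) g
    = pvWcol g c (pvSegRoll [] (pvColOf g c R))
  rw [hrange, hcol, hnw]
  set nw := pvSegRoll [] (pvColOf g c R) with hnwdef
  rw [List.foldl_map]
  have hfun : ∀ (g2 : List (List String)) (r : Nat), r ∈ List.range R →
      rsStepB (c : Int) nw g2 ((r : Nat) : Int)
        = g2.set r ((g2.getD r []).set c (nw.getD r "")) := by
    intro g2 r _
    simp [rsStepB, PySem.List.pySetD_natCast, PySem.List.pyGetD_natCast]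
  rw [PySem.List.foldl_congr_mem _ _
    (fun g2 r => g2.set r ((g2.getD r []).set c (nw.getD r ""))) _
    (fun acc r hr => hfun acc r hr)]
  rw [← hlen]
  exact pvWB nw g c

theorem pvOuter (R C : Nat) :
    ∀ (L : List Int) (g : List (List String)),
      (∀ x ∈ L, ∃ n : Nat, x = (n : Int) ∧ n < C) →
      (R ≤ g.length) → (∀ i, i < R → C ≤ (g.getD i []).length) →
      L.foldl (fun g col =>
          ((PySem.List.pyRange ((R : Int) - 1) (-1) (-1)).foldl (rsStepA col) (g, (R : Int) - 1)).1) g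
        = L.foldl (fun g col =>
            let nw := pyRollColumn
              ((PySem.List.pyRange 0 (R : Int) 1).map
                (fun r => PySem.List.pyGetD (PySem.List.pyGetD g r []) col ""))
            (PySem.List.pyRange 0 (R : Int) 1).foldl (rsStepB col nw) g) g := by
  intro L
  induction L with
  | nil => intro g _ _ _; rfl
  | cons x L ihL =>
    intro g hmem hR hC
    obtain ⟨n, rfl, hnC⟩ := hmem x List.mem_cons_self
    simp only [List.foldl_cons]
    rw [pvKey R C n g hnC hR hC, pvKeyB R C n g hnC hR hC]
    set g' := pvWcol g n (pvSegRoll [] (pvColOf g n R)) with hg'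
    exact ihL g' (fun y hy => hmem y (List.mem_cons_of_mem _ hy))
      (by rw [hg', length_pvWcol]; exact hR)
      (fun i hi => by rw [hg', len_getD_pvWcol]; exact hC i hi)

-- ===== VERDICT (by name: the statement is the Claim_ definition above) =====
theorem pvFoldlConst (fA fB : List (List String) → Int → List (List String))
    (hA : ∀ g x, fA g x = g) (hB : ∀ g x, fB g x = g) :
    ∀ (L : List Int) (g : List (List String)), L.foldl fA g = L.foldl fB g := by
  intro L
  induction L with
  | nil => intro g; rfl
  | cons x L ihL => intro g; simp only [List.foldl_cons, hA, hB]; exact ihL g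

theorem roll_south_spec : Claim_equal_roll_south := by
  intro grid rows cols _ hpre
  show roll_south grid rows cols = roll_south_alt grid rows cols
  unfold roll_south roll_south_alt
  by_cases hc0 : cols ≤ 0
  · rw [PySem.List.pyRange_one_eq_nil hc0]
    rfl
  · by_cases hr0 : rows ≤ 0
    · apply pvFoldlConst
      · intro g col
        simp only [PySem.List.pyRange_neg_one_eq_nil (show rows - 1 ≤ -1 by omega),
          List.foldl_nil]
      · intro g col
        simp only [PySem.List.pyRange_one_eq_nil hr0, List.map_nil, List.foldl_nil]
    · obtain ⟨hrg, hrow⟩ : rows ≤ (grid.length : Int) ∧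
          ∀ row ∈ grid.take rows.toNat, cols ≤ (row.length : Int) := by
        rcases hpre with h | h | h
        · omega
        · omega
        · exact h
      have hrowsR : rows = ((rows.toNat : Nat) : Int) := by omega
      have hcolsC : cols = ((cols.toNat : Nat) : Int) := by omega
      set R := rows.toNat with hRdef
      set C := cols.toNat with hCdef
      have hR : R ≤ grid.length := by omega
      have hC : ∀ i, i < R → C ≤ (grid.getD i []).length := by
        intro i hi
        have hig : i < grid.length := lt_of_lt_of_le hi hR
        have hmem : grid.getD i [] ∈ grid.take R := by
          rw [List.getD_eq_getElem _ _ hig]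
          have h1 : i < (grid.take R).length := by simp; omega
          have h2 : (grid.take R)[i] = grid[i] := List.getElem_take
          rw [← h2]
          exact List.getElem_mem h1
        have := hrow _ hmem
        omega
      rw [hrowsR, hcolsC]
      apply pvOuter R C
      · intro x hx
        have hx' := (PySem.List.mem_pyRange_one).1 hx
        exact ⟨x.toNat, by omega, by omega⟩
      · exact hR
      · exact hC
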